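-- pv_equiv track=rewrite | github.com/maninscarymask/python | words.py | deconstruct
-- ===== SOURCE A (Python) =====
-- def deconstruct(word):
-- 	hold = {}
-- 	for letter in word:
-- 		if letter in hold:
-- 			# If letter key exists, increment
-- 			hold[letter] += 1
-- 		else:
-- 			# If letter key !exists, add it
-- 			hold[letter] = 1
--
-- 	# Take the items, make them sortable, then sort them
-- 	hold_items = hold.items()
-- 	hold = sorted(hold_items)
-- 	return hold
-- ===== SOURCE B (Python) =====
-- from itertools import groupby
--
--
-- def deconstruct(word):
-- 	# Sort the characters, then count each run of equal characters in one pass.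
-- 	return [(letter, sum(1 for _ in group)) for letter, group in groupby(sorted(word))]
-- ===== Notes on version B (the rewrite author's own statement) =====
-- stated objective: idiomatic
-- what changed: Replaced the frequency dict plus final sort of its items by sorting the characters first and counting runs of equal characters with itertools.groupby.
import Mathlib
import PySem

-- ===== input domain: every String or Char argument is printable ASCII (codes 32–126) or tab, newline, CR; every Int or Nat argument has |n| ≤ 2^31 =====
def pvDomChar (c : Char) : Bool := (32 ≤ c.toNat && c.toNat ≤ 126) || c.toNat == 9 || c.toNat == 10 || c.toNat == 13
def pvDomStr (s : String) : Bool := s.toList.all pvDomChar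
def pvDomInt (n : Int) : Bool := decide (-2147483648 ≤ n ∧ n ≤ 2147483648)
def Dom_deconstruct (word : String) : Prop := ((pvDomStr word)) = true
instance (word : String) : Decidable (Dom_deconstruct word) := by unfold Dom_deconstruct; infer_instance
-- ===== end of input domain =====

-- B replaces A's frequency dict + final sort of its items by sort-then-group-runs (itertools.groupby); idiomatic, same cost.
-- ===== PORT A =====
-- one loop step: 'if letter in hold: hold[letter] += 1 else: hold[letter] = 1'
-- (the 'hold[letter]' read is guarded by the 'in' test, so getD 0 is exact here)
def deconstructStep (hold : PySem.Dict Char Int) (letter : Char) : PySem.Dict Char Int :=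
  if hold.contains letter then hold.insert letter (hold.getD letter 0 + 1)
  else hold.insert letter 1

-- Python sorts the (letter, count) tuples; dict keys are distinct, so tuple sort = sort by the letter.
-- Characters stand for Python's 1-char strings; the final map is the type-convention glue to String.
def deconstruct (word : String) : List (String × Int) :=
  let hold := word.toList.foldl deconstructStep PySem.Dict.empty
  (PySem.List.sorted hold.items (fun p => p.1)).map (fun p => (String.singleton p.1, p.2))

-- ===== PORT B =====
-- groupby over the sorted characters: each run of equal characters yields one (letter, run length) pair
def groupRuns : List Char → List (Char × Int)
  | [] => []
  | c :: rest =>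
    (c, 1 + (rest.takeWhile (· == c)).length) :: groupRuns (rest.dropWhile (· == c))
termination_by l => l.length
decreasing_by
  simpa using Nat.lt_succ_of_le (List.length_dropWhile_le _ rest)

def deconstruct_alt (word : String) : List (String × Int) :=
  (groupRuns (PySem.List.sorted word.toList (fun c => c))).map
    (fun p => (String.singleton p.1, p.2))

-- ===== PRECONDITION & SPEC =====
def Spec_deconstruct (word : String) (out : List (String × Int)) : Prop := out = deconstruct_alt word
instance (word : String) (out : List (String × Int)) : Decidable (Spec_deconstruct word out) := by unfold Spec_deconstruct; infer_instance

-- ===== CLAIM (what is proved, stated in full; the proofs are below) =====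
def Claim_equal_deconstruct : Prop := ∀ (word : String), Dom_deconstruct word → Spec_deconstruct word (deconstruct word)

-- ===== LEMMAS AND PROOFS =====

/-- Characterisation shared by both sides: distinct keys, and the pairs are
exactly (c, multiplicity of c in cs) for the c occurring in cs. -/
def IsCount (cs : List Char) (l : List (Char × Int)) : Prop :=
  (l.map Prod.fst).Nodup ∧ ∀ p : Char × Int, p ∈ l ↔ p.1 ∈ cs ∧ p.2 = (cs.count p.1 : Int)

/-- A's loop invariant: after folding cs, the dict's items satisfy IsCount cs. -/
theorem foldA_isCount (cs : List Char) :
    IsCount cs ((cs.foldl deconstructStep PySem.Dict.empty).items) := by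
  induction cs using List.reverseRecOn with
  | nil =>
    exact ⟨by simp [PySem.Dict.empty], fun p => by simp [PySem.Dict.empty]⟩
  | append_singleton cs c ih =>
    obtain ⟨hnd, hmem⟩ := ih
    rw [List.foldl_append]
    set D := cs.foldl deconstructStep PySem.Dict.empty with hD
    simp only [List.foldl_cons, List.foldl_nil]
    have hcontains : D.contains c = true ↔ c ∈ cs := by
      constructor
      · intro h
        obtain ⟨p, hp, hpc⟩ := List.any_eq_true.mp h
        have h1 := ((hmem p).mp hp).1
        have h2 : p.1 = c := by simpa using hpc
        rwa [h2] at h1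
      · intro h
        exact List.any_eq_true.mpr ⟨(c, (cs.count c : Int)), (hmem _).mpr ⟨h, rfl⟩, by simp⟩
    have hcs1 : ∀ x : Char, x ≠ c → List.count x [c] = 0 :=
      fun x hx => List.count_eq_zero.mpr (by simp [hx])
    unfold deconstructStep
    by_cases hc : D.contains c = true
    · -- letter already present: in-place overwrite
      have hcin : c ∈ cs := hcontains.mp hc
      have hgetD : D.getD c 0 = (cs.count c : Int) := by
        have hfs : (D.items.find? (fun p => p.1 == c)).isSome := by
          obtain ⟨p, hp, hpc⟩ := List.any_eq_true.mp hc
          exact List.find?_isSome.mpr ⟨p, hp, hpc⟩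
        obtain ⟨q, hq⟩ := Option.isSome_iff_exists.mp hfs
        have hqm := List.mem_of_find?_eq_some hq
        have hqc : q.1 = c := by simpa using List.find?_some hq
        have hqv := ((hmem q).mp hqm).2
        simp [PySem.Dict.getD, PySem.Dict.get?, hq, hqv, hqc]
      rw [if_pos hc, hgetD]
      have hins : (D.insert c ((cs.count c : Int) + 1)).items
          = D.items.map (fun p => if p.1 == c then (c, (cs.count c : Int) + 1) else p) := by
        simp [PySem.Dict.insert, hc]
      rw [hins]
      constructor
      · -- keys unchanged
        have : (D.items.map (fun p => if p.1 == c then (c, (cs.count c : Int) + 1) else p)).map Prod.fst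
            = D.items.map Prod.fst := by
          rw [List.map_map]
          refine List.map_congr_left (fun p _ => ?_)
          by_cases h : p.1 = c <;> simp [h]
        rw [this]; exact hnd
      · intro p
        constructor
        · intro hp
          obtain ⟨q, hq, hqe⟩ := List.mem_map.mp hp
          obtain ⟨hq1, hq2⟩ := (hmem q).mp hq
          by_cases h : q.1 = c
          · rw [if_pos (by simpa using h)] at hqe
            subst hqe
            refine ⟨by simp, ?_⟩
            show (cs.count c : Int) + 1 = (((cs ++ [c]).count c : Nat) : Int)
            rw [List.count_append]
            have : List.count c [c] = 1 := by simp
            push_cast [this]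
            ring
          · rw [if_neg (by simpa using h)] at hqe
            subst hqe
            refine ⟨List.mem_append_left _ hq1, ?_⟩
            rw [List.count_append, hcs1 q.1 h]
            simpa using hq2
        · rintro ⟨hp1, hp2⟩
          by_cases h : p.1 = c
          · have hcnt : p.2 = (cs.count c : Int) + 1 := by
              rw [hp2, h, List.count_append]; push_cast; simp
            refine List.mem_map.mpr ⟨(c, (cs.count c : Int)), (hmem _).mpr ⟨hcin, rfl⟩, ?_⟩
            simp only [if_pos (by simp : (((c, (cs.count c : Int)) : Char × Int).1 == c) = true)]
            exact (Prod.ext_iff.mpr ⟨h, hcnt⟩).symm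
          · have hp1' : p.1 ∈ cs := by
              rcases List.mem_append.mp hp1 with h' | h'
              · exact h'
              · simp at h'; exact absurd h' h
            have hcnt : p.2 = (cs.count p.1 : Int) := by
              rw [hp2, List.count_append, hcs1 p.1 h]; simp
            refine List.mem_map.mpr ⟨p, (hmem _).mpr ⟨hp1', hcnt⟩, by simp [h]⟩
    · -- new letter: appended at the end
      have hcnotin : c ∉ cs := fun h => hc (hcontains.mpr h)
      rw [if_neg hc]
      have hins : (D.insert c 1).items = D.items ++ [(c, 1)] := by
        simp [PySem.Dict.insert, hc]
      rw [hins]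
      constructor
      · rw [List.map_append]
        refine List.Nodup.append hnd (by simp) ?_
        intro x hx hy
        simp only [List.map_cons, List.map_nil, List.mem_singleton] at hy
        obtain ⟨q, hq, hqx⟩ := List.mem_map.mp hx
        refine hcnotin ?_
        have := ((hmem q).mp hq).1
        rwa [hqx, hy] at this
      · intro p
        have hc0 : cs.count c = 0 := List.count_eq_zero.mpr hcnotin
        constructor
        · intro hp
          rcases List.mem_append.mp hp with h' | h'
          · obtain ⟨hq1, hq2⟩ := (hmem p).mp h'
            have hne : p.1 ≠ c := fun h => hcnotin (h ▸ hq1)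
            refine ⟨List.mem_append_left _ hq1, ?_⟩
            rw [List.count_append, hcs1 p.1 hne]
            simpa using hq2
          · simp only [List.mem_singleton] at h'
            subst h'
            refine ⟨by simp, ?_⟩
            show (1 : Int) = (((cs ++ [c]).count c : Nat) : Int)
            rw [List.count_append, hc0]
            simp
        · rintro ⟨hp1, hp2⟩
          by_cases h : p.1 = c
          · refine List.mem_append_right _ ?_
            have h2 : p.2 = 1 := by
              rw [hp2, h, List.count_append, hc0]; simp
            have hpe : p = ((c, 1) : Char × Int) := Prod.ext_iff.mpr ⟨h, h2⟩
            simp [hpe]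
          · have hp1' : p.1 ∈ cs := by
              rcases List.mem_append.mp hp1 with h' | h'
              · exact h'
              · simp at h'; exact absurd h' h
            refine List.mem_append_left _ ((hmem p).mpr ⟨hp1', ?_⟩)
            rw [List.count_append, hcs1 p.1 h] at hp2
            simpa using hp2

/-- Elements left by dropWhile (== c) on a sorted lower-bounded list are > c. -/
theorem gt_of_mem_dropWhile (c : Char) :
    ∀ (l : List Char), l.Pairwise (· ≤ ·) → (∀ x ∈ l, c ≤ x) →
      ∀ x ∈ l.dropWhile (· == c), c < x := by
  intro l
  induction l with
  | nil => intro _ _ x hx; simp at hx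
  | cons a l ih =>
    intro hpw hlb x hx
    obtain ⟨ha, hl⟩ := List.pairwise_cons.mp hpw
    by_cases hac : a = c
    · rw [List.dropWhile_cons_of_pos (by simp [hac])] at hx
      exact ih hl (fun y hy => hlb y (List.mem_cons_of_mem _ hy)) x hx
    · rw [List.dropWhile_cons_of_neg (by simp [hac])] at hx
      have hca : c < a := lt_of_le_of_ne (hlb a (by simp)) (Ne.symm hac)
      rcases List.mem_cons.mp hx with h | h
      · exact h ▸ hca
      · exact lt_of_lt_of_le hca (ha x h)

/-- B's grouping lemma: on a sorted list, groupRuns produces the count table,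
with strictly increasing keys. -/
theorem groupRuns_isCount : ∀ (s : List Char), s.Pairwise (· ≤ ·) →
    IsCount s (groupRuns s) ∧ (groupRuns s).Pairwise (fun p q => p.1 < q.1) := by
  intro s
  induction s using groupRuns.induct with
  | case1 =>
    exact fun _ => ⟨⟨by simp [groupRuns], fun p => by simp [groupRuns]⟩, by simp [groupRuns]⟩
  | case2 c rest ih =>
    intro hpw
    obtain ⟨hub, hrest⟩ := List.pairwise_cons.mp hpw
    set t1 := rest.takeWhile (· == c) with ht1
    set t2 := rest.dropWhile (· == c) with ht2
    have hsplit : rest = t1 ++ t2 := (List.takeWhile_append_dropWhile).symm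
    have ht1c : ∀ x ∈ t1, x = c := fun x hx => by
      simpa using List.mem_takeWhile_imp hx
    have ht2pw : t2.Pairwise (· ≤ ·) := hrest.sublist (List.dropWhile_sublist _)
    have ht2gt : ∀ x ∈ t2, c < x := gt_of_mem_dropWhile c rest hrest hub
    obtain ⟨⟨ihnd, ihmem⟩, ihpw⟩ := ih ht2pw
    have hcount_c : (c :: rest).count c = 1 + t1.length := by
      have h1 : t1.count c = t1.length :=
        List.count_eq_length.mpr (fun b hb => (ht1c b hb).symm)
      have h2 : t2.count c = 0 :=
        List.count_eq_zero.mpr (fun h => lt_irrefl c (ht2gt c h))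
      rw [hsplit]
      simp [List.count_append, h1, h2]
      omega
    have hcount_ne : ∀ x : Char, x ≠ c → (c :: rest).count x = t2.count x := by
      intro x hx
      have h1 : t1.count x = 0 :=
        List.count_eq_zero.mpr (fun h => hx (ht1c x h))
      rw [hsplit]
      simp [List.count_append, h1, Ne.symm hx]
    have hmem' : ∀ p : Char × Int,
        p ∈ groupRuns (c :: rest) ↔ p.1 ∈ c :: rest ∧ p.2 = ((c :: rest).count p.1 : Int) := by
      intro p
      rw [groupRuns]
      constructor
      · intro hp
        rcases List.mem_cons.mp hp with h | h
        · subst h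
          refine ⟨by simp, ?_⟩
          simp only [← ht1]
          rw [hcount_c]; push_cast; ring
        · obtain ⟨hp1, hp2⟩ := (ihmem p).mp h
          have hne : p.1 ≠ c := fun he => lt_irrefl c (he ▸ ht2gt p.1 hp1)
          have hp1' : p.1 ∈ rest := (List.dropWhile_sublist _).subset hp1
          exact ⟨List.mem_cons_of_mem _ hp1', by rw [hcount_ne p.1 hne]; exact hp2⟩
      · rintro ⟨hp1, hp2⟩
        by_cases h : p.1 = c
        · refine List.mem_cons.mpr (Or.inl ?_)
          have h2 : p.2 = 1 + (t1.length : Int) := by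
            rw [hp2, h, hcount_c]; push_cast; ring
          exact Prod.ext_iff.mpr ⟨h, h2⟩
        · refine List.mem_cons.mpr (Or.inr ((ihmem p).mpr ⟨?_, ?_⟩))
          · have hp1r : p.1 ∈ rest := by
              rcases List.mem_cons.mp hp1 with h' | h'
              · exact absurd h' h
              · exact h'
            rw [hsplit] at hp1r
            rcases List.mem_append.mp hp1r with h' | h'
            · exact absurd (ht1c _ h') h
            · exact h'
          · rw [hp2, hcount_ne p.1 h]
    have hpw' : (groupRuns (c :: rest)).Pairwise (fun p q => p.1 < q.1) := by
      rw [groupRuns]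
      refine List.pairwise_cons.mpr ⟨?_, ihpw⟩
      intro q hq
      exact ht2gt q.1 ((ihmem q).mp hq).1
    refine ⟨⟨?_, hmem'⟩, hpw'⟩
    have hne : (groupRuns (c :: rest)).Pairwise (fun p q => p.1 ≠ q.1) :=
      hpw'.imp (fun h => ne_of_lt h)
    exact (List.pairwise_map).mpr hne

/-- Two strictly-key-sorted count tables of the same multiset are equal. -/
theorem isCount_unique (cs : List Char) (l₁ l₂ : List (Char × Int))
    (h₁ : IsCount cs l₁) (h₂ : IsCount cs l₂)
    (hp₁ : l₁.Pairwise (fun p q => p.1 < q.1))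
    (hp₂ : l₂.Pairwise (fun p q => p.1 < q.1)) : l₁ = l₂ := by
  have hnd₁ : l₁.Nodup := List.Nodup.of_map Prod.fst h₁.1
  have hnd₂ : l₂.Nodup := List.Nodup.of_map Prod.fst h₂.1
  have hperm : l₁.Perm l₂ := (List.perm_ext_iff_of_nodup hnd₁ hnd₂).mpr
    (fun p => (h₁.2 p).trans (h₂.2 p).symm)
  exact List.Perm.eq_of_pairwise
    (fun a b _ _ hab hba => absurd hba (not_lt_of_gt hab)) hp₁ hp₂ hperm

-- ===== VERDICT (by name: the statement is the Claim_ definition above) =====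
theorem deconstruct_spec : Claim_equal_deconstruct := by
  intro word _
  show deconstruct word = deconstruct_alt word
  have key : PySem.List.sorted ((word.toList.foldl deconstructStep PySem.Dict.empty).items)
        (fun p => p.1)
      = groupRuns (PySem.List.sorted word.toList (fun c => c)) := by
    set cs := word.toList with hcs
    set S := PySem.List.sorted (cs.foldl deconstructStep PySem.Dict.empty).items
      (fun p => p.1) with hS
    have hpermS : S.Perm (cs.foldl deconstructStep PySem.Dict.empty).items :=
      PySem.List.sorted_perm _ _ _
    obtain ⟨hndA, hmemA⟩ := foldA_isCount cs
    have hndS : (S.map Prod.fst).Nodup := ((hpermS.map Prod.fst).nodup_iff).mpr hndA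
    have hleS : S.Pairwise (fun p q => p.1 ≤ q.1) :=
      PySem.List.sorted_pairwise (cs.foldl deconstructStep PySem.Dict.empty).items
        (fun p : Char × Int => p.1)
    have hltS : S.Pairwise (fun p q => p.1 < q.1) := by
      have hne : S.Pairwise (fun p q => p.1 ≠ q.1) := (List.pairwise_map).mp hndS
      exact (hleS.and hne).imp (fun ⟨h1, h2⟩ => lt_of_le_of_ne h1 h2)
    have hIsS : IsCount cs S :=
      ⟨hndS, fun p => (hpermS.mem_iff).trans (hmemA p)⟩
    set s' := PySem.List.sorted cs (fun c => c) with hs'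
    have hperms' : s'.Perm cs := PySem.List.sorted_perm _ _ _
    have hpws' : s'.Pairwise (· ≤ ·) := PySem.List.sorted_pairwise cs (fun c : Char => c)
    obtain ⟨⟨hndG, hmemG⟩, hltG⟩ := groupRuns_isCount s' hpws'
    have hIsG : IsCount cs (groupRuns s') := by
      refine ⟨hndG, fun p => (hmemG p).trans ?_⟩
      rw [hperms'.mem_iff, hperms'.count_eq]
    exact isCount_unique cs S (groupRuns s') hIsS hIsG hltS hltG
  simp only [deconstruct, deconstruct_alt, key]
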